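-- pv_equiv track=rewrite | github.com/olsenw/LeetCodeExercises | Python3/satisfiability_of_equality_equations.py | equationsPossible_fails
-- ===== SOURCE A (Python) =====
-- from typing import List
-- from collections import defaultdict
--
-- def equationsPossible_fails(equations: List[str]) -> bool:
--     eq = defaultdict(set)
--     nq = defaultdict(set)
--     for equation in equations:
--         if equation[1] == '!':
--             nq[equation[0]].add(equation[-1])
--             nq[equation[-1]].add(equation[0])
--         else:
--             eq[equation[0]].add(equation[-1])
--             eq[equation[-1]].add(equation[0])
--     for k in eq:
--         for v in eq[k]:
--             if v in nq[k]:
--                 return False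
--     for k in nq:
--         for v in nq[k]:
--             if v in eq[k]:
--                 return False
--     return True
-- ===== SOURCE B (Python) =====
-- def equationsPossible_fails(equations):
--     # Sort-then-scan: normalise each equation to a triple (lo, hi, is_neq),
--     # sort the triples, and check no two adjacent triples are the same
--     # unordered pair with opposite operators.
--     def triple(e):
--         a, b = e[0], e[-1]
--         if b < a:
--             a, b = b, a
--         return (a, b, e[1] == '!')
--     ts = sorted(triple(e) for e in equations)
--     return all(not (t[0] == u[0] and t[1] == u[1] and t[2] != u[2])
--                for t, u in zip(ts, ts[1:]))
-- ===== Notes on version B (the rewrite author's own statement) =====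
-- stated objective: alternative
-- what changed: B normalises each equation to a (lo, hi, is_neq) endpoint triple, sorts the triples lexicographically, and detects a contradicting duplicate pair by a single adjacent-pair scan, instead of A's per-node adjacency defaultdicts with two symmetric nested conflict scans (sort-then-scan vs hash-indexed adjacency).
import Mathlib
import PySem

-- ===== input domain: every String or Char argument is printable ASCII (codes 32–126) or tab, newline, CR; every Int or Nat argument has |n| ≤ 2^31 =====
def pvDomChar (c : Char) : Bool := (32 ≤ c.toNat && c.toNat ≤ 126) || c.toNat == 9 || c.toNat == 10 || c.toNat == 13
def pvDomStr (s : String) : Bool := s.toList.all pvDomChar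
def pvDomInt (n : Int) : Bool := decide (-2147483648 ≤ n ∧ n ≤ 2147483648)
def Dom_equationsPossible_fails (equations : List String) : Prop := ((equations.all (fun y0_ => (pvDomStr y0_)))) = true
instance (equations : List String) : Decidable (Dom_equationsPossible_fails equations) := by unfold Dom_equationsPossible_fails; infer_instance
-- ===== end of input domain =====

-- B sorts the equations' normalised (lo, hi, is_neq) endpoint triples and scans adjacent entries
-- for an opposite-operator duplicate, instead of A's adjacency dicts with two nested conflict
-- scans (objective: alternative).

-- ===== PORT A =====
-- loop body of A: on '!' add each endpoint to the other's nq-set, else to the eq-set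
-- (defaultdict read-side key creation in A's scan loops only ever inserts empty sets and
--  cannot change the returned value, so the port reads with getD ∅ instead).
def pvStepA (st : PySem.Dict Char (PySem.Set Char) × PySem.Dict Char (PySem.Set Char))
    (equation : String) :
    PySem.Dict Char (PySem.Set Char) × PySem.Dict Char (PySem.Set Char) :=
  let cs := equation.toList
  let a := PySem.List.pyGetD cs 0 ' '
  let b := PySem.List.pyGetD cs (-1) ' '
  if PySem.List.pyGetD cs 1 ' ' = '!' then
    (st.1, ((st.2.modify a PySem.Set.empty (fun s => s.add b)).modify b PySem.Set.empty (fun s => s.add a)))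
  else
    (((st.1.modify a PySem.Set.empty (fun s => s.add b)).modify b PySem.Set.empty (fun s => s.add a)), st.2)

def equationsPossible_fails (equations : List String) : Bool :=
  let st := equations.foldl pvStepA (PySem.Dict.empty, PySem.Dict.empty)
  let eq := st.1
  let nq := st.2
  -- 'for k in eq: for v in eq[k]: if v in nq[k]: return False'
  if eq.keys.any (fun k => (eq.getD k PySem.Set.empty).any
      (fun v => PySem.Set.contains (nq.getD k PySem.Set.empty) v)) then false
  -- 'for k in nq: for v in nq[k]: if v in eq[k]: return False'
  else if nq.keys.any (fun k => (nq.getD k PySem.Set.empty).any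
      (fun v => PySem.Set.contains (eq.getD k PySem.Set.empty) v)) then false
  else true

-- ===== PORT B =====
-- triple(e): endpoints normalised lo ≤ hi by the explicit swap, plus the operator flag
def pvTriple (e : String) : Char × Char × Bool :=
  let cs := e.toList
  let a := PySem.List.pyGetD cs 0 ' '
  let b := PySem.List.pyGetD cs (-1) ' '
  let o := PySem.List.pyGetD cs 1 ' ' == '!'
  if b < a then (b, a, o) else (a, b, o)

-- Python's lexicographic tuple order on (Char, Char, Bool), ported as an order-isomorphic
-- integer key (Char codes are < 1114112, so the encoding is exact for the tuple order)
def pvKey (t : Char × Char × Bool) : Nat :=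
  (t.1.toNat * 1114112 + t.2.1.toNat) * 2 + (if t.2.2 then 1 else 0)

-- 'all(not (...) for t, u in zip(ts, ts[1:]))': adjacent–pair scan
def pvScanOK : List (Char × Char × Bool) → Bool
  | t :: u :: r =>
      !(t.1 == u.1 && t.2.1 == u.2.1 && !(t.2.2 == u.2.2)) && pvScanOK (u :: r)
  | _ => true

def equationsPossible_fails_alt (equations : List String) : Bool :=
  pvScanOK (PySem.List.sorted (equations.map pvTriple) pvKey)

-- ===== PRECONDITION & SPEC =====
-- Pre_ excludes exactly the inputs containing a string of length < 2, on which A's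
-- 'equation[1]' raises IndexError.
def Pre_equationsPossible_fails (equations : List String) : Prop :=
  ∀ s ∈ equations, 2 ≤ s.toList.length
instance (equations : List String) : Decidable (Pre_equationsPossible_fails equations) := by
  unfold Pre_equationsPossible_fails; infer_instance

def pvWitness_equationsPossible_fails : List String := ["a==b", "b!=c", "a==a"]

def Spec_equationsPossible_fails (equations : List String) (out : Bool) : Prop :=
  out = equationsPossible_fails_alt equations
instance (equations : List String) (out : Bool) :
    Decidable (Spec_equationsPossible_fails equations out) := by
  unfold Spec_equationsPossible_fails; infer_instance

-- ===== CLAIM (what is proved, stated in full; the proofs are below) =====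
def Claim_equal_equationsPossible_fails : Prop :=
  ∀ (equations : List String), Dom_equationsPossible_fails equations →
    Pre_equationsPossible_fails equations →
    Spec_equationsPossible_fails equations (equationsPossible_fails equations)

-- ===== LEMMAS AND PROOFS =====

-- proof-side abbreviations for an equation's endpoints and operator
def pvA (e : String) : Char := PySem.List.pyGetD e.toList 0 ' '
def pvB (e : String) : Char := PySem.List.pyGetD e.toList (-1) ' '
def pvOp (e : String) : Bool := PySem.List.pyGetD e.toList 1 ' ' == '!'

def pvNorm (a b : Char) : Char × Char := if a ≤ b then (a, b) else (b, a)
def pvKeyOf (e : String) : Char × Char := pvNorm (pvA e) (pvB e)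

-- the common characterisation both programs are reduced to
def pvConflict (L : List String) : Prop :=
  ∃ e1 ∈ L, ∃ e2 ∈ L, pvKeyOf e1 = pvKeyOf e2 ∧ pvOp e1 ≠ pvOp e2

def pvConflictT (T : List (Char × Char × Bool)) : Prop :=
  ∃ t1 ∈ T, ∃ t2 ∈ T, t1.1 = t2.1 ∧ t1.2.1 = t2.2.1 ∧ t1.2.2 ≠ t2.2.2

theorem pvNorm_symm (a b : Char) : pvNorm a b = pvNorm b a := by
  unfold pvNorm
  split_ifs with h1 h2 h2
  · exact Prod.ext (le_antisymm h1 h2) (le_antisymm h2 h1)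
  · rfl
  · rfl
  · exact absurd (le_total a b) (by tauto)

theorem pvNorm_eq_iff (x y a b : Char) :
    pvNorm x y = pvNorm a b ↔ (x = a ∧ y = b) ∨ (x = b ∧ y = a) := by
  constructor
  · unfold pvNorm
    split_ifs with h1 h2 h2 <;> intro h <;>
      rcases Prod.mk.injEq .. ▸ h with ⟨hl, hr⟩
    · tauto
    · tauto
    · tauto
    · tauto
  · rintro (⟨rfl, rfl⟩ | ⟨rfl, rfl⟩)
    · rfl
    · exact pvNorm_symm x y

theorem pvNorm_idem (a b : Char) : pvNorm (pvNorm a b).1 (pvNorm a b).2 = pvNorm a b := by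
  unfold pvNorm
  split_ifs with h h2 <;> first
    | rfl
    | exact absurd ((not_le.mp h).le) h2

theorem pvMem_modify2 (d : PySem.Dict Char (PySem.Set Char)) (a b x y : Char) :
    y ∈ ((d.modify a PySem.Set.empty (fun s => s.add b)).modify b PySem.Set.empty
          (fun s => s.add a)).getD x PySem.Set.empty ↔
      y ∈ d.getD x PySem.Set.empty ∨ (x = a ∧ y = b) ∨ (x = b ∧ y = a) := by
  by_cases hab : a = b
  · subst hab
    by_cases hxa : x = a <;>
      simp [PySem.Dict.getD_modify, hxa, PySem.Set.mem_add] <;> tauto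
  · have hba : ¬ b = a := fun hh => hab hh.symm
    by_cases hxb : x = b <;> by_cases hxa : x = a <;>
      simp [PySem.Dict.getD_modify, hab, hba, hxb, hxa, PySem.Set.mem_add] <;> tauto

-- membership in A's two adjacency dicts after the building fold
theorem pvMemFoldA (L : List String) (dq dn : PySem.Dict Char (PySem.Set Char)) (x y : Char) :
    (y ∈ (L.foldl pvStepA (dq, dn)).1.getD x PySem.Set.empty ↔
       y ∈ dq.getD x PySem.Set.empty ∨
         ∃ e ∈ L, pvOp e = false ∧ pvNorm (pvA e) (pvB e) = pvNorm x y) ∧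
    (y ∈ (L.foldl pvStepA (dq, dn)).2.getD x PySem.Set.empty ↔
       y ∈ dn.getD x PySem.Set.empty ∨
         ∃ e ∈ L, pvOp e = true ∧ pvNorm (pvA e) (pvB e) = pvNorm x y) := by
  induction L generalizing dq dn with
  | nil => simp
  | cons e t ih =>
    have hC : ((x = pvA e ∧ y = pvB e) ∨ (x = pvB e ∧ y = pvA e)) ↔
        pvNorm (pvA e) (pvB e) = pvNorm x y := by
      constructor
      · intro h; exact ((pvNorm_eq_iff x y _ _).2 h).symm
      · intro h; exact (pvNorm_eq_iff x y _ _).1 h.symm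
    by_cases hop : PySem.List.pyGetD e.toList 1 ' ' = '!'
    · have hstep : pvStepA (dq, dn) e =
          (dq, (dn.modify (pvA e) PySem.Set.empty (fun s => s.add (pvB e))).modify (pvB e)
                PySem.Set.empty (fun s => s.add (pvA e))) := by
        simp [pvStepA, pvA, pvB, hop]
      have hO : pvOp e = true := by simp [pvOp, hop]
      rw [List.foldl_cons, hstep]
      constructor
      · rw [(ih _ _).1]
        simp only [List.mem_cons]
        constructor
        · rintro (h | ⟨e', he', h1, h2⟩)
          · exact Or.inl h
          · exact Or.inr ⟨e', Or.inr he', h1, h2⟩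
        · rintro (h | ⟨e', (rfl | he'), h1, h2⟩)
          · exact Or.inl h
          · rw [hO] at h1; cases h1
          · exact Or.inr ⟨e', he', h1, h2⟩
      · rw [(ih _ _).2]
        simp only [List.mem_cons]
        constructor
        · rintro (h | ⟨e', he', h1, h2⟩)
          · rcases (pvMem_modify2 dn (pvA e) (pvB e) x y).1 h with h | h
            · exact Or.inl h
            · exact Or.inr ⟨e, Or.inl rfl, hO, hC.1 h⟩
          · exact Or.inr ⟨e', Or.inr he', h1, h2⟩
        · rintro (h | ⟨e', (rfl | he'), h1, h2⟩)
          · exact Or.inl ((pvMem_modify2 dn (pvA e) (pvB e) x y).2 (Or.inl h))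
          · exact Or.inl ((pvMem_modify2 dn (pvA e') (pvB e') x y).2 (Or.inr (hC.2 h2)))
          · exact Or.inr ⟨e', he', h1, h2⟩
    · have hstep : pvStepA (dq, dn) e =
          ((dq.modify (pvA e) PySem.Set.empty (fun s => s.add (pvB e))).modify (pvB e)
                PySem.Set.empty (fun s => s.add (pvA e)), dn) := by
        simp [pvStepA, pvA, pvB, hop]
      have hO : pvOp e = false := by simp [pvOp, hop]
      rw [List.foldl_cons, hstep]
      constructor
      · rw [(ih _ _).1]
        simp only [List.mem_cons]
        constructor
        · rintro (h | ⟨e', he', h1, h2⟩)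
          · rcases (pvMem_modify2 dq (pvA e) (pvB e) x y).1 h with h | h
            · exact Or.inl h
            · exact Or.inr ⟨e, Or.inl rfl, hO, hC.1 h⟩
          · exact Or.inr ⟨e', Or.inr he', h1, h2⟩
        · rintro (h | ⟨e', (rfl | he'), h1, h2⟩)
          · exact Or.inl ((pvMem_modify2 dq (pvA e) (pvB e) x y).2 (Or.inl h))
          · exact Or.inl ((pvMem_modify2 dq (pvA e') (pvB e') x y).2 (Or.inr (hC.2 h2)))
          · exact Or.inr ⟨e', he', h1, h2⟩
      · rw [(ih _ _).2]
        simp only [List.mem_cons]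
        constructor
        · rintro (h | ⟨e', he', h1, h2⟩)
          · exact Or.inl h
          · exact Or.inr ⟨e', Or.inr he', h1, h2⟩
        · rintro (h | ⟨e', (rfl | he'), h1, h2⟩)
          · exact Or.inl h
          · rw [hO] at h1; cases h1
          · exact Or.inr ⟨e', he', h1, h2⟩

theorem pvMem_getD_keys (d : PySem.Dict Char (PySem.Set Char)) (x y : Char)
    (h : y ∈ d.getD x PySem.Set.empty) : x ∈ d.keys := by
  by_contra hx
  rw [PySem.Dict.getD_eq_get?_getD,
      (PySem.Dict.get?_eq_none_iff_not_mem_keys d x).2 hx] at h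
  simp [PySem.Set.empty] at h

-- the scan 'any k ∈ keys, any v ∈ d1[k], v ∈ d2[k]' is exactly the conflict condition
theorem pvScan_iff (d1 d2 : PySem.Dict Char (PySem.Set Char)) :
    (d1.keys.any (fun k => (d1.getD k PySem.Set.empty).any
        (fun v => PySem.Set.contains (d2.getD k PySem.Set.empty) v)) = true) ↔
      ∃ x y : Char, y ∈ d1.getD x PySem.Set.empty ∧ y ∈ d2.getD x PySem.Set.empty := by
  simp only [List.any_eq_true]
  constructor
  · rintro ⟨k, _, v, hv, hv2⟩
    exact ⟨k, v, hv, by simpa using hv2⟩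
  · rintro ⟨x, y, hy1, hy2⟩
    exact ⟨x, pvMem_getD_keys d1 x y hy1, y, hy1, by simpa using hy2⟩

-- A returns True exactly when no unordered pair carries both operators
theorem pvA_iff (L : List String) :
    equationsPossible_fails L = true ↔ ¬ pvConflict L := by
  unfold equationsPossible_fails
  set st := L.foldl pvStepA (PySem.Dict.empty, PySem.Dict.empty) with hst
  have hm : ∀ x y : Char,
      (y ∈ st.1.getD x PySem.Set.empty ↔
        ∃ e ∈ L, pvOp e = false ∧ pvNorm (pvA e) (pvB e) = pvNorm x y) ∧
      (y ∈ st.2.getD x PySem.Set.empty ↔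
        ∃ e ∈ L, pvOp e = true ∧ pvNorm (pvA e) (pvB e) = pvNorm x y) := by
    intro x y
    have h := pvMemFoldA L PySem.Dict.empty PySem.Dict.empty x y
    simpa [PySem.Dict.getD_empty, PySem.Set.empty] using h
  have hconf : (∃ x y : Char, y ∈ st.1.getD x PySem.Set.empty ∧
      y ∈ st.2.getD x PySem.Set.empty) ↔ pvConflict L := by
    constructor
    · rintro ⟨x, y, h1, h2⟩
      obtain ⟨e1, he1, ho1, hk1⟩ := ((hm x y).1).1 h1
      obtain ⟨e2, he2, ho2, hk2⟩ := ((hm x y).2).1 h2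
      exact ⟨e1, he1, e2, he2, by unfold pvKeyOf; rw [hk1, hk2], by rw [ho1, ho2]; simp⟩
    · rintro ⟨e1, he1, e2, he2, hk, hne⟩
      have horient : ∃ ea ∈ L, ∃ eb ∈ L, pvOp ea = false ∧ pvOp eb = true ∧
          pvKeyOf ea = pvKeyOf eb := by
        cases h1 : pvOp e1 <;> cases h2 : pvOp e2
        · exact absurd (h1.trans h2.symm) hne
        · exact ⟨e1, he1, e2, he2, h1, h2, hk⟩
        · exact ⟨e2, he2, e1, he1, h2, h1, hk.symm⟩
        · exact absurd (h1.trans h2.symm) hne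
      obtain ⟨ea, hea, eb, heb, hoa, hob, hkab⟩ := horient
      refine ⟨(pvKeyOf ea).1, (pvKeyOf ea).2, ?_, ?_⟩
      · exact ((hm _ _).1).2 ⟨ea, hea, hoa, (pvNorm_idem (pvA ea) (pvB ea)).symm⟩
      · refine ((hm _ _).2).2 ⟨eb, heb, hob, ?_⟩
        rw [show pvNorm (pvA eb) (pvB eb) = pvKeyOf eb from rfl, ← hkab]
        exact (pvNorm_idem (pvA ea) (pvB ea)).symm
  by_cases hc : ∃ x y : Char, y ∈ st.1.getD x PySem.Set.empty ∧
      y ∈ st.2.getD x PySem.Set.empty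
  · rw [if_pos ((pvScan_iff st.1 st.2).2 hc)]
    constructor
    · intro h; cases h
    · intro h; exact absurd (hconf.1 hc) h
  · rw [if_neg (fun hh => hc ((pvScan_iff st.1 st.2).1 hh)),
        if_neg (fun hh => by
          obtain ⟨x, y, hy2, hy1⟩ := (pvScan_iff st.2 st.1).1 hh
          exact hc ⟨x, y, hy1, hy2⟩)]
    exact iff_of_true rfl (fun hp => hc (hconf.2 hp))

-- B–side: the triple of an equation is its normalised key plus its operator
theorem pvCharLt (c : Char) : c.toNat < 1114112 := by
  have he : c.toNat = c.val.toNat := rfl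
  rcases c.valid with h | ⟨h1, h2⟩ <;> omega

theorem pvCharEq {c d : Char} (h : c.toNat = d.toNat) : c = d := by
  apply Char.ext; exact UInt32.toNat_inj.mp h

theorem pvTriple_comp (e : String) : pvTriple e = ((pvKeyOf e).1, (pvKeyOf e).2, pvOp e) := by
  by_cases h : PySem.List.pyGetD e.toList (-1) ' ' < PySem.List.pyGetD e.toList 0 ' '
  · simp [pvTriple, pvKeyOf, pvNorm, pvA, pvB, pvOp, h, not_le.mpr h]
  · simp [pvTriple, pvKeyOf, pvNorm, pvA, pvB, pvOp, h, not_lt.mp h]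

theorem pvMapConf (L : List String) : pvConflictT (L.map pvTriple) ↔ pvConflict L := by
  simp only [pvConflictT, pvConflict, List.mem_map]
  constructor
  · rintro ⟨t1, ⟨e1, he1, rfl⟩, t2, ⟨e2, he2, rfl⟩, h1, h2, h3⟩
    rw [pvTriple_comp e1, pvTriple_comp e2] at h1 h2 h3
    exact ⟨e1, he1, e2, he2, Prod.ext h1 h2, h3⟩
  · rintro ⟨e1, he1, e2, he2, hk, hne⟩
    refine ⟨pvTriple e1, ⟨e1, he1, rfl⟩, pvTriple e2, ⟨e2, he2, rfl⟩, ?_⟩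
    rw [pvTriple_comp e1, pvTriple_comp e2]
    exact ⟨by rw [hk], by rw [hk], hne⟩

theorem pvKey_succ (t u : Char × Char × Bool) (h1 : t.1 = u.1) (h2 : t.2.1 = u.2.1)
    (ho1 : t.2.2 = false) (ho2 : u.2.2 = true) : pvKey u = pvKey t + 1 := by
  simp [pvKey, h1, h2, ho1, ho2]

theorem pvKey_decode (t u : Char × Char × Bool) (hf : t.2.2 = false)
    (hlo : pvKey t ≤ pvKey u) (hhi : pvKey u ≤ pvKey t + 1) :
    t.1 = u.1 ∧ t.2.1 = u.2.1 := by
  have b1 := pvCharLt t.2.1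
  have b2 := pvCharLt u.2.1
  cases ho2 : u.2.2 <;> simp [pvKey, hf, ho2] at hlo hhi <;>
    exact ⟨pvCharEq (by omega), pvCharEq (by omega)⟩

theorem pvScanOK_adj (a b : Char × Char × Bool) (r : List (Char × Char × Bool))
    (h : pvScanOK (a :: b :: r) = true) :
    (¬(a.1 = b.1 ∧ a.2.1 = b.2.1 ∧ a.2.2 ≠ b.2.2)) ∧ pvScanOK (b :: r) = true := by
  rw [pvScanOK] at h
  simp only [Bool.and_eq_true] at h
  refine ⟨?_, h.2⟩
  intro ⟨e1, e2, e3⟩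
  have h1 := h.1
  simp [e1, e2, e3] at h1

-- if a sorted triple list passes the adjacent scan, equal pairs always carry equal operators
theorem pvScan_sound (l : List (Char × Char × Bool))
    (hp : l.Pairwise (fun x y => pvKey x ≤ pvKey y)) (hok : pvScanOK l = true) :
    ∀ t1 ∈ l, ∀ t2 ∈ l, t1.1 = t2.1 → t1.2.1 = t2.2.1 → t1.2.2 = t2.2.2 := by
  induction l with
  | nil => simp
  | cons a l ih =>
    cases l with
    | nil =>
      intro t1 h1 t2 h2 _ _
      simp only [List.mem_singleton] at h1 h2
      rw [h1, h2]
    | cons b r =>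
      obtain ⟨hadj, hrest⟩ := pvScanOK_adj a b r hok
      have hpa : ∀ y ∈ b :: r, pvKey a ≤ pvKey y := (List.pairwise_cons.mp hp).1
      have hp' := (List.pairwise_cons.mp hp).2
      have IH := ih hp' hrest
      have main : ∀ t2 ∈ b :: r, a.1 = t2.1 → a.2.1 = t2.2.1 → a.2.2 = t2.2.2 := by
        intro t2 ht2 h1 h2
        by_contra hne
        cases hoa : a.2.2 with
        | true =>
          have hot : t2.2.2 = false := by revert hne; rw [hoa]; cases t2.2.2 <;> simp
          have hs := pvKey_succ t2 a h1.symm h2.symm hot hoa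
          have hle := hpa t2 ht2
          omega
        | false =>
          have hot : t2.2.2 = true := by revert hne; rw [hoa]; cases t2.2.2 <;> simp
          have hsucc := pvKey_succ a t2 h1 h2 hoa hot
          have hab : pvKey a ≤ pvKey b := hpa b (List.mem_cons_self)
          have hbt : pvKey b ≤ pvKey t2 := by
            rcases List.mem_cons.mp ht2 with rfl | hmem
            · exact le_refl _
            · exact (List.pairwise_cons.mp hp').1 t2 hmem
          have hdec := pvKey_decode a b hoa hab (by omega)
          cases hob : b.2.2 with
          | true => exact hadj ⟨hdec.1, hdec.2, by rw [hoa, hob]; simp⟩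
          | false =>
            have hcon := IH b (List.mem_cons_self) t2 ht2 (hdec.1.symm.trans h1)
              (hdec.2.symm.trans h2)
            rw [hob, hot] at hcon
            cases hcon
      intro t1 ht1 t2 ht2 h1 h2
      rcases List.mem_cons.mp ht1 with rfl | hm1 <;> rcases List.mem_cons.mp ht2 with rfl | hm2
      · rfl
      · exact main t2 hm2 h1 h2
      · exact (main t1 hm1 h1.symm h2.symm).symm
      · exact IH t1 hm1 t2 hm2 h1 h2

-- if the adjacent scan fails, the list really contains a conflicting pair
theorem pvScan_complete (l : List (Char × Char × Bool)) (h : pvScanOK l = false) :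
    pvConflictT l := by
  induction l with
  | nil => cases h
  | cons a l ih =>
    cases l with
    | nil => cases h
    | cons b r =>
      rw [pvScanOK] at h
      rcases Bool.and_eq_false_iff.mp h with h1 | h2
      · refine ⟨a, List.mem_cons_self, b, List.mem_cons.mpr (Or.inr List.mem_cons_self), ?_⟩
        simp only [Bool.not_eq_false', Bool.and_eq_true, beq_iff_eq, Bool.not_eq_true'] at h1
        obtain ⟨⟨e1, e2⟩, e3⟩ := h1
        refine ⟨e1, e2, ?_⟩
        rw [beq_eq_false_iff_ne] at e3
        exact e3
      · obtain ⟨t1, ht1, t2, ht2, hc⟩ := ih h2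
        exact ⟨t1, List.mem_cons.mpr (Or.inr ht1), t2, List.mem_cons.mpr (Or.inr ht2), hc⟩

theorem pvB_iff (L : List String) :
    equationsPossible_fails_alt L = true ↔ ¬ pvConflict L := by
  unfold equationsPossible_fails_alt
  set s := PySem.List.sorted (L.map pvTriple) pvKey with hs
  have hmem : ∀ x, x ∈ s ↔ x ∈ L.map pvTriple := fun x =>
    PySem.List.mem_sorted (L.map pvTriple) pvKey false x
  have hpair := PySem.List.sorted_pairwise (L.map pvTriple) pvKey
  constructor
  · intro hok hconf
    obtain ⟨t1, ht1, t2, ht2, h1, h2, h3⟩ := (pvMapConf L).2 hconf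
    exact h3 (pvScan_sound s hpair hok t1 ((hmem t1).2 ht1) t2 ((hmem t2).2 ht2) h1 h2)
  · intro hnc
    cases hok : pvScanOK s with
    | false =>
      exfalso
      obtain ⟨t1, ht1, t2, ht2, hc⟩ := pvScan_complete s hok
      exact hnc ((pvMapConf L).1 ⟨t1, (hmem t1).1 ht1, t2, (hmem t2).1 ht2, hc⟩)
    | true => rfl

-- ===== VERDICT (by name: the statement is the Claim_ definition above) =====
theorem equationsPossible_fails_spec : Claim_equal_equationsPossible_fails := by
  intro equations _ _
  unfold Spec_equationsPossible_fails
  have hA := pvA_iff equations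
  have hB := pvB_iff equations
  by_cases hc : pvConflict equations
  · have h1 : equationsPossible_fails equations = false := by
      cases h : equationsPossible_fails equations
      · rfl
      · exact absurd hc (hA.1 h)
    have h2 : equationsPossible_fails_alt equations = false := by
      cases h : equationsPossible_fails_alt equations
      · rfl
      · exact absurd hc (hB.1 h)
    rw [h1, h2]
  · rw [hA.2 hc, hB.2 hc]
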